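-- pv_equiv track=rewrite | github.com/MarkusNeusinger/pyplots | plots/barcode-code128/implementations/letsplot.py | encode_code128b
-- ===== SOURCE A (Python) =====
-- CODE128B_CHARS = {chr(i + 32): i for i in range(95)}
--
-- def encode_code128b(text):
--     """Encode text using Code 128B (ASCII printable characters)."""
--     values = []
--     for char in text:
--         if char in CODE128B_CHARS:
--             values.append(CODE128B_CHARS[char])
--         else:
--             values.append(0)
--     return values
-- ===== SOURCE B (Python) =====
-- def encode_code128b(text):
--     """Encode text using Code 128B (ASCII printable characters)."""
--     if not text:
--         return []
--     if len(text) == 1: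
--         o = ord(text)
--         return [o - 32 if 32 <= o <= 126 else 0]
--     mid = len(text) // 2
--     return encode_code128b(text[:mid]) + encode_code128b(text[mid:])
-- ===== Notes on version B (the rewrite author's own statement) =====
-- stated objective: alternative
-- what changed: Replaces the table-driven left-to-right accumulator loop by divide-and-conquer recursion: the string is split in halves down to single characters, whose value is computed in closed form (ord-32 for printable ASCII, else 0), and the halves' encodings are concatenated.
import Mathlib
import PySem

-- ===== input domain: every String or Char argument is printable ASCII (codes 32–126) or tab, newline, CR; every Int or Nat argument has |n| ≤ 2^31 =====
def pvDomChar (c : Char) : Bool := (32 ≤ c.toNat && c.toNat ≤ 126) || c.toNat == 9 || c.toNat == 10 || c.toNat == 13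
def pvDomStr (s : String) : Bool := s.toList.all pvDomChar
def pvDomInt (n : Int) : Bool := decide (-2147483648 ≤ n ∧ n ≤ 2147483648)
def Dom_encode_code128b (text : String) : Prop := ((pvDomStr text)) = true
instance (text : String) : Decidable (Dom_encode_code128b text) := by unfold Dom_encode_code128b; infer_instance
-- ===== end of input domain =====

-- B drops A's 95-entry lookup table and single accumulator loop for a divide-and-conquer
-- recursion on string halves with closed-form per-character arithmetic: alternative structure, same result.

-- ===== PORT A =====
-- CODE128B_CHARS = {chr(i + 32): i for i in range(95)}
def CODE128B_CHARS : PySem.Dict Char Int :=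
  (PySem.List.pyRange 0 95 1).foldl
    (fun d i => d.insert (Char.ofNat (i + 32).toNat) i) PySem.Dict.empty

def encode_code128b (text : String) : List Int :=
  text.toList.foldl
    (fun values char =>
      if CODE128B_CHARS.contains char then
        values ++ [CODE128B_CHARS.getD char 0]
      else
        values ++ [0]) []

-- ===== PORT B =====
-- divide-and-conquer on the character list, exactly Source B's recursion (text[:mid]/text[mid:] = take/drop)
def encode_code128b_alt_core (l : List Char) : List Int :=
  if l = [] then []
  else if l.length = 1 then
    [if 32 ≤ l.head!.toNat ∧ l.head!.toNat ≤ 126 then (l.head!.toNat : Int) - 32 else 0]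
  else
    let mid := l.length / 2
    encode_code128b_alt_core (l.take mid) ++ encode_code128b_alt_core (l.drop mid)
termination_by l.length
decreasing_by
  · have h0 : l.length ≠ 0 := by simpa [List.length_eq_zero_iff] using (by assumption : ¬ l = [])
    simp [List.length_take]; omega
  · have h0 : l.length ≠ 0 := by simpa [List.length_eq_zero_iff] using (by assumption : ¬ l = [])
    simp [List.length_drop]; omega

def encode_code128b_alt (text : String) : List Int :=
  encode_code128b_alt_core text.toList

-- ===== PRECONDITION & SPEC =====
def Spec_encode_code128b (text : String) (out : List Int) : Prop := out = encode_code128b_alt text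
instance (text : String) (out : List Int) : Decidable (Spec_encode_code128b text out) := by unfold Spec_encode_code128b; infer_instance

-- ===== CLAIM =====
def Claim_equal_encode_code128b : Prop := ∀ (text : String), Dom_encode_code128b text → Spec_encode_code128b text (encode_code128b text)

-- ===== LEMMAS AND PROOFS =====

lemma dict_prefix_get? (c : Char) : ∀ n : ℕ, n ≤ 95 →
    (((List.range n).map Int.ofNat).foldl
      (fun d i => d.insert (Char.ofNat (i + 32).toNat) i) PySem.Dict.empty).get? c
    = if 32 ≤ c.toNat ∧ c.toNat < 32 + n then some ((c.toNat : Int) - 32) else none := by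
  intro n
  induction n with
  | zero =>
    intro _
    rw [if_neg (by omega)]
    simp [PySem.Dict.get?_empty]
  | succ n ih =>
    intro hn
    rw [List.range_succ, List.map_append, List.foldl_append]
    simp only [List.map_cons, List.map_nil, List.foldl_cons, List.foldl_nil]
    have hkey : ((Int.ofNat n) + 32).toNat = n + 32 := by simp [Int.ofNat_eq_natCast]; omega
    rw [hkey, PySem.Dict.get?_insert, ih (by omega)]
    have hvalid : Nat.isValidChar (n + 32) := by left; omega
    by_cases hc : c = Char.ofNat (n + 32)
    · have hct : c.toNat = n + 32 := by
        subst hc; rw [Char.toNat_ofNat, if_pos hvalid]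
      rw [if_pos hc, if_pos (by omega)]
      congr 1; omega
    · have hct : c.toNat ≠ n + 32 := by
        intro h
        apply hc
        rw [← Char.ofNat_toNat c, h]
      rw [if_neg hc]
      by_cases h32 : 32 ≤ c.toNat ∧ c.toNat < 32 + n
      · rw [if_pos h32, if_pos (by omega)]
      · rw [if_neg h32, if_neg (by omega)]

lemma table_get? (c : Char) :
    CODE128B_CHARS.get? c
    = if 32 ≤ c.toNat ∧ c.toNat ≤ 126 then some ((c.toNat : Int) - 32) else none := by
  have h : CODE128B_CHARS
      = ((List.range 95).map Int.ofNat).foldl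
          (fun d i => d.insert (Char.ofNat (i + 32).toNat) i) PySem.Dict.empty := by
    unfold CODE128B_CHARS
    rw [PySem.List.pyRange_one]
    simp
    rfl
  rw [h, dict_prefix_get? c 95 (le_refl 95)]
  by_cases h32 : 32 ≤ c.toNat ∧ c.toNat ≤ 126
  · rw [if_pos (by omega), if_pos h32]
  · rw [if_neg (by omega), if_neg h32]

-- the common closed form both proofs meet at
def charVal (c : Char) : Int :=
  if 32 ≤ c.toNat ∧ c.toNat ≤ 126 then (c.toNat : Int) - 32 else 0

lemma foldl_body (l : List Char) : ∀ acc : List Int,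
    l.foldl (fun values char =>
      if CODE128B_CHARS.contains char then
        values ++ [CODE128B_CHARS.getD char 0]
      else values ++ [0]) acc
    = acc ++ l.map charVal := by
  induction l with
  | nil => intro acc; simp
  | cons c l ih =>
    intro acc
    simp only [List.foldl_cons, List.map_cons, ih]
    have hcont : CODE128B_CHARS.contains c = (CODE128B_CHARS.get? c).isSome := by
      rw [PySem.Dict.contains_eq_isSome_get?]
    have hgetD : CODE128B_CHARS.getD c 0 = (CODE128B_CHARS.get? c).getD 0 := by
      rw [PySem.Dict.getD_eq_get?_getD]
    rw [hcont, hgetD, table_get? c]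
    unfold charVal
    by_cases h32 : 32 ≤ c.toNat ∧ c.toNat ≤ 126
    · rw [if_pos h32, if_pos h32]; simp
    · rw [if_neg h32, if_neg h32]; simp

lemma core_eq_map (l : List Char) : encode_code128b_alt_core l = l.map charVal := by
  induction l using encode_code128b_alt_core.induct with
  | case1 => simp [encode_code128b_alt_core]
  | case2 l hne h1 =>
    obtain ⟨c, rfl⟩ := List.length_eq_one_iff.mp h1
    simp [encode_code128b_alt_core, charVal]
  | case3 l hne h1 mid ih1 ih2 =>
    rw [encode_code128b_alt_core, if_neg hne, if_neg h1]
    show encode_code128b_alt_core (l.take (l.length / 2)) ++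
        encode_code128b_alt_core (l.drop (l.length / 2)) = l.map charVal
    rw [ih1, ih2, ← List.map_append, List.take_append_drop]

-- ===== VERDICT =====
theorem encode_code128b_spec : Claim_equal_encode_code128b := by
  intro text _
  unfold Spec_encode_code128b encode_code128b encode_code128b_alt
  rw [foldl_body, core_eq_map]
  simp
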